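-- pv_equiv track=rewrite | github.com/sarapr06/ESC180-labs | labs/lab 5/prob4.py | list1_start_with_list2
-- ===== SOURCE A (Python) =====
-- def list1_start_with_list2(list1,list2):
--     if len(list1)>=len(list2):
--         for e in range(len(list2)):
--             if list2[e]!=list1[e]:
--                 return False
--         return True
--     else:
--         return False
-- ===== SOURCE B (Python) =====
-- def list1_start_with_list2(list1, list2):
--     return list1[:len(list2)] == list2
-- ===== Notes on version B (the rewrite author's own statement) =====
-- stated objective: simpler
-- what changed: Replaces the length guard plus explicit index loop with a single slice-and-compare expression list1[:len(list2)] == list2, relying on built-in list equality.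
import Mathlib
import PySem

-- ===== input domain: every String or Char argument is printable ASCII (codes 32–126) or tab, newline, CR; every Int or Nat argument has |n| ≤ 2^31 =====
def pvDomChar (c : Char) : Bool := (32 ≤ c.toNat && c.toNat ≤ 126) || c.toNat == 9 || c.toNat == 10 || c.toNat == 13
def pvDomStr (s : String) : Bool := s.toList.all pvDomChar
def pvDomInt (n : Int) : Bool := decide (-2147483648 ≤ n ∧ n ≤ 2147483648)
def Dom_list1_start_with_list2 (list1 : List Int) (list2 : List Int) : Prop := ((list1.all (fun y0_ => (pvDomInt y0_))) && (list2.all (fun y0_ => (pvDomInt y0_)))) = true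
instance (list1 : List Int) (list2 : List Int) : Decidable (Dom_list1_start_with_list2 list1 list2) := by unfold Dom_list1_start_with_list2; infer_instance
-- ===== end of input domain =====

-- B replaces A's length guard and explicit comparison loop by one slice-and-compare expression (objective: simpler).


-- ===== PORT A =====
-- loop over e in range(len(list2)); early 'return False' on a mismatch
def pyALoop (list1 : List Int) (list2 : List Int) (e : Nat) : Bool :=
  if e < list2.length then
    if PySem.List.pyGet? list2 (e : Int) ≠ PySem.List.pyGet? list1 (e : Int) then false
    else pyALoop list1 list2 (e + 1)
  else true
termination_by list2.length - e

def list1_start_with_list2 (list1 : List Int) (list2 : List Int) : Bool :=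
  if list1.length ≥ list2.length then pyALoop list1 list2 0
  else false

-- ===== PORT B =====
-- B: one expression, slice list1[:len(list2)] compared with list2
def list1_start_with_list2_alt (list1 : List Int) (list2 : List Int) : Bool :=
  PySem.List.slice list1 none (some (list2.length : Int)) == list2

-- ===== PRECONDITION & SPEC =====
def Spec_list1_start_with_list2 (list1 : List Int) (list2 : List Int) (out : Bool) : Prop := out = list1_start_with_list2_alt list1 list2
instance (list1 : List Int) (list2 : List Int) (out : Bool) : Decidable (Spec_list1_start_with_list2 list1 list2 out) := by unfold Spec_list1_start_with_list2; infer_instance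

-- ===== CLAIM (what is proved, stated in full; the proofs are below) =====
def Claim_equal_list1_start_with_list2 : Prop := ∀ (list1 : List Int) (list2 : List Int), Dom_list1_start_with_list2 list1 list2 → Spec_list1_start_with_list2 list1 list2 (list1_start_with_list2 list1 list2)

-- ===== LEMMAS AND PROOFS =====

theorem pyALoop_eq (list1 list2 : List Int) (e : Nat) (hlen : list2.length ≤ list1.length) :
    pyALoop list1 list2 e = ((list1.drop e).take (list2.length - e) == list2.drop e) := by
  unfold pyALoop
  by_cases h : e < list2.length
  · have h1 : e < list1.length := lt_of_lt_of_le h hlen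
    rw [if_pos h]
    have hg2 : PySem.List.pyGet? list2 (e : Int) = some list2[e] := by
      simp [PySem.List.pyGet?_natCast, List.getElem?_eq_getElem h]
    have hg1 : PySem.List.pyGet? list1 (e : Int) = some list1[e] := by
      simp [PySem.List.pyGet?_natCast, List.getElem?_eq_getElem h1]
    rw [List.drop_eq_getElem_cons h, List.drop_eq_getElem_cons h1]
    have htk : list2.length - e = (list2.length - (e + 1)) + 1 := by omega
    rw [htk, List.take_succ_cons]
    by_cases hne : list2[e] = list1[e]
    · rw [if_neg (by simp [hg1, hg2, hne])]
      rw [pyALoop_eq list1 list2 (e + 1) hlen]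
      simp [hne]
    · rw [if_pos (by simp [hg1, hg2, hne])]
      rw [List.cons_beq_cons,
        show (list1[e] == list2[e]) = false from beq_eq_false_iff_ne.mpr (fun h => hne h.symm)]
      simp
  · rw [if_neg h]
    have : list2.length - e = 0 := by omega
    simp [this, List.drop_eq_nil_of_le (by omega : list2.length ≤ e)]
termination_by list2.length - e

theorem alt_eq (list1 list2 : List Int) :
    list1_start_with_list2_alt list1 list2 = (list1.take list2.length == list2) := by
  unfold list1_start_with_list2_alt
  rw [PySem.List.slice_to_natCast]


-- ===== VERDICT (by name: the statement is the Claim_ definition above) =====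
theorem list1_start_with_list2_spec : Claim_equal_list1_start_with_list2 := by
  intro list1 list2 _
  unfold Spec_list1_start_with_list2 list1_start_with_list2
  rw [alt_eq]
  by_cases h : list1.length ≥ list2.length
  · rw [if_pos h, pyALoop_eq list1 list2 0 h]
    simp
  · rw [if_neg h]
    have hne : list1.take list2.length ≠ list2 := by
      intro heq
      have := congrArg List.length heq
      simp at this
      omega
    simp [hne]
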